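-- pv_equiv track=rewrite | github.com/GreenlightsSerenade/Test | 백준/Platinum/3015. 오아시스 재결합/오아시스 재결합.py | solution
-- ===== SOURCE A (Python) =====
-- def solution(n, nums):
--     if n == 1 or n == 2:
--         return n - 1
--     stck = []
--     ans = 0
--     for num in nums:
--         if not stck:
--             stck.append([num, 1])
--         else:
--             if stck[-1][0] > num:
--                 stck.append([num, 1])
--                 ans += 1
--             else:
--                 cnt = 0
--                 while stck and (stck[-1][0] == num or stck[-1][0] < num):
--                     elem, x = stck.pop()
--                     ans += x
--                     if elem == num:
--                         cnt = x
--                 if stck and stck[-1][0] > num: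
--                     ans += 1
--                 stck.append([num, cnt + 1])
--     return ans
-- ===== SOURCE B (Python) =====
-- def solution(n, nums):
--     if n == 1 or n == 2:
--         return n - 1
--     ans = 0
--     m = len(nums)
--     for i in range(m):
--         a = nums[i]
--         mx = float('-inf')  # max of heights strictly between i and j
--         for j in range(i + 1, m):
--             b = nums[j]
--             if mx <= (a if a < b else b):
--                 ans += 1
--             if b > mx:
--                 mx = b
--             if mx > a:
--                 break  # a blocker taller than nums[i]: no later j can pair with i
--     return ans
-- ===== Notes on version B (the rewrite author's own statement) =====
-- stated objective: alternative
-- what changed: B replaces A's monotonic value/count stack with a direct double scan over pairs: for each left index i it walks right, keeps the running maximum of the heights strictly between the endpoints, counts a pair whenever that maximum is at most min(nums[i], nums[j]), and stops the walk once the maximum exceeds nums[i].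
import Mathlib
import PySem

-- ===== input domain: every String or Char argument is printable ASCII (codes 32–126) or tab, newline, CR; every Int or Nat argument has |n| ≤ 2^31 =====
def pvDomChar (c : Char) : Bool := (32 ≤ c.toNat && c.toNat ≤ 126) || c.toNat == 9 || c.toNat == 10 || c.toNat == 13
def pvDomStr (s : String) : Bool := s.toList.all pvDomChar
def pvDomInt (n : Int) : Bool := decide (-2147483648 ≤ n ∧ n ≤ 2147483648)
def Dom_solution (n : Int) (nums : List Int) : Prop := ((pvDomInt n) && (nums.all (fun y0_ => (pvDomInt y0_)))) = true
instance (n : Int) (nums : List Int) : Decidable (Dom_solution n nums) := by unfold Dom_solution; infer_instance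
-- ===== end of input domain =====

-- B counts visible pairs by a direct double scan (running maximum between the endpoints, early
-- stop at a taller blocker) instead of A's monotonic value/count stack; objective: alternative.

-- ===== PORT A =====
-- The Python stack (append/pop at the right end) is represented head-first: list head = stack top.
-- Python's `while stck and (stck[-1][0] == num or stck[-1][0] < num): …` loop, carrying (ans, cnt):
def popLoop (x : Int) : List (Int × Int) → Int → Int → (List (Int × Int)) × Int × Int
  | [], ans, cnt => ([], ans, cnt)
  | (h, c) :: rest, ans, cnt =>
    if h = x ∨ h < x then
      popLoop x rest (ans + c) (if h = x then c else cnt)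
    else ((h, c) :: rest, ans, cnt)

def stepA (st : List (Int × Int) × Int) (x : Int) : List (Int × Int) × Int :=
  match st with
  | (stck, ans) =>
    match stck with
    | [] => ([(x, 1)], ans)
    | (h, c) :: rest =>
      if h > x then ((x, 1) :: (h, c) :: rest, ans + 1)
      else
        let r := popLoop x ((h, c) :: rest) ans 0
        let ans' := match r.1 with
          | [] => r.2.1
          | (h', _) :: _ => if h' > x then r.2.1 + 1 else r.2.1
        ((x, r.2.2 + 1) :: r.1, ans')

def solution (n : Int) (nums : List Int) : Int :=
  if n = 1 ∨ n = 2 then n - 1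
  else (nums.foldl stepA ([], 0)).2

-- ===== PORT B =====
-- `mx = float('-inf')` and its updates are modeled exactly by an Option Int (none = -inf):
-- mxLeB mx m is Python's `mx <= m`, bumpMax mx b is Python's `max(mx, b)` (exact, since all
-- compared values are the list's integers).
def mxLeB (mx : Option Int) (m : Int) : Bool :=
  match mx with
  | none => true
  | some v => decide (v ≤ m)

def bumpMax (mx : Option Int) (b : Int) : Option Int :=
  match mx with
  | none => some b
  | some v => some (if v < b then b else v)

-- inner loop `for j in range(i+1, len(nums))` over the suffix after index i, accumulating ans;
-- `(a if a < b else b)` is min a b, `if b > mx: mx = b` is bumpMax, `if mx > a: break` is the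
-- early-return branch below
def innerB (a : Int) : Option Int → List Int → Int → Int
  | _, [], ans => ans
  | mx, b :: s, ans =>
    let ans' := ans + if mxLeB mx (min a b) then 1 else 0
    let mx' := bumpMax mx b
    if mxLeB mx' a then innerB a mx' s ans' else ans'

-- outer loop `for i in range(len(nums))`: element nums[i] together with the suffix after it
def outerB : List Int → Int → Int
  | [], ans => ans
  | a :: s, ans => outerB s (innerB a none s ans)

def solution_alt (n : Int) (nums : List Int) : Int :=
  if n = 1 ∨ n = 2 then n - 1 else outerB nums 0

-- ===== PRECONDITION & SPEC =====
def Spec_solution (n : Int) (nums : List Int) (out : Int) : Prop := out = solution_alt n nums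
instance (n : Int) (nums : List Int) (out : Int) : Decidable (Spec_solution n nums out) := by unfold Spec_solution; infer_instance

-- ===== CLAIM (what is proved, stated in full; the proofs are below) =====
def Claim_equal_solution : Prop := ∀ (n : Int) (nums : List Int), Dom_solution n nums → Spec_solution n nums (solution n nums)

-- ===== LEMMAS AND PROOFS =====

-- pairs counted from a fixed left endpoint `a`, context max `mx`, over the suffix
def visF (a : Int) : Option Int → List Int → Int
  | _, [] => 0
  | mx, b :: s => (if mxLeB mx (min a b) then 1 else 0) + visF a (bumpMax mx b) s

-- pairs counted into a new right endpoint `x` from elements of prefix p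
def visTo : List Int → Int → Int
  | [], _ => 0
  | a :: q, x => (if q.all (fun y => decide (y ≤ min a x)) then 1 else 0) + visTo q x

-- number of suffix-record positions of p with value ≤ m
def cntLow : List Int → Int → Int
  | [], _ => 0
  | a :: q, m => (if decide (a ≤ m) && q.all (fun y => decide (y ≤ a)) then 1 else 0) + cntLow q m

-- sum of stack counts over entries of height ≤ m
def sumLE : List (Int × Int) → Int → Int
  | [], _ => 0
  | e :: t, m => (if e.1 ≤ m then e.2 else 0) + sumLE t m

-- prefix-grouped pair count: pairs (i, j) with j in r and i in p ++ (r before j)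
def Sspec : List Int → List Int → Int
  | _, [] => 0
  | p, x :: r => visTo p x + Sspec (p ++ [x]) r

-- left-grouped pair count within one list (B's grouping)
def Tspec : List Int → Int
  | [] => 0
  | a :: s => visF a none s + Tspec s

def omaxL : List Int → Option Int
  | [] => none
  | y :: q => bumpMax (omaxL q) y

-- cross pairs from elements of p into r, with x interposed between p and r
def crossAux : List Int → Int → List Int → Int
  | [], _, _ => 0
  | a :: q, x, r => visF a (bumpMax (omaxL q) x) r + crossAux q x r

-- cross pairs from elements of p into r
def crossL : List Int → List Int → Int
  | [], _ => 0
  | a :: q, r => visF a (omaxL q) r + crossL q r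

-- stack invariant after processing prefix p
def StackInv (p : List Int) (s : List (Int × Int)) : Prop :=
  s.Pairwise (fun u v => u.1 < v.1)
  ∧ (∀ m : Int, sumLE s m = cntLow p m)
  ∧ (∀ m : Int, (∃ e ∈ s, m < e.1) ↔ (∃ y ∈ p, m < y))

theorem bumpMax_comm (m : Option Int) (a b : Int) :
    bumpMax (bumpMax m a) b = bumpMax (bumpMax m b) a := by
  cases m <;> simp only [bumpMax, Option.some.injEq] <;> split_ifs <;> omega

theorem omaxL_append (q : List Int) (x : Int) : omaxL (q ++ [x]) = bumpMax (omaxL q) x := by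
  induction q with
  | nil => rfl
  | cons y q ih => simp only [List.cons_append, omaxL, ih, bumpMax_comm]

theorem mxLe_bump (mx : Option Int) (y m : Int) :
    mxLeB (bumpMax mx y) m = (decide (y ≤ m) && mxLeB mx m) := by
  cases mx with
  | none => simp [bumpMax, mxLeB]
  | some v =>
    simp only [bumpMax, mxLeB]
    split_ifs <;> rw [← Bool.decide_and, decide_eq_decide] <;> omega

theorem mxLe_omaxL (q : List Int) (m : Int) :
    mxLeB (omaxL q) m = q.all (fun y => decide (y ≤ m)) := by
  induction q with
  | nil => rfl
  | cons y q ih => simp [omaxL, mxLe_bump, ih]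

theorem crossL_nil (p : List Int) : crossL p [] = 0 := by
  induction p with
  | nil => rfl
  | cons a q ih => simp [crossL, visF, ih]

theorem crossL_append (p : List Int) (x : Int) (r : List Int) :
    crossL (p ++ [x]) r = crossAux p x r + visF x none r := by
  induction p with
  | nil => simp [crossL, crossAux, omaxL]
  | cons a q ih =>
    simp only [List.cons_append, crossL, crossAux, ih, omaxL_append]
    ring

theorem crossL_cons_right (p : List Int) (x : Int) (r : List Int) :
    crossL p (x :: r) = visTo p x + crossAux p x r := by
  induction p with
  | nil => simp [crossL, visTo, crossAux]
  | cons a q ih =>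
    simp only [crossL, visF, visTo, crossAux, ih, mxLe_omaxL]
    ring

theorem Sspec_eq : ∀ (r p : List Int), Sspec p r = crossL p r + Tspec r
  | [], p => by simp [Sspec, crossL_nil, Tspec]
  | x :: r, p => by
    simp only [Sspec, Sspec_eq r, crossL_append, crossL_cons_right, Tspec]
    ring

-- visTo split: records of value ≤ x, plus (at most) one taller blocker
theorem all_le_eq_not_any_lt (q : List Int) (x : Int) :
    q.all (fun y => decide (y ≤ x)) = !q.any (fun y => decide (x < y)) := by
  induction q with
  | nil => rfl
  | cons y q ih => by_cases h : y ≤ x <;> simp_all <;> omega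

theorem visTo_split (p : List Int) (x : Int) :
    visTo p x = cntLow p x + (if p.any (fun y => decide (x < y)) then 1 else 0) := by
  induction p with
  | nil => simp [visTo, cntLow]
  | cons a q ih =>
    simp only [visTo, cntLow, ih, List.any_cons]
    by_cases hax : a ≤ x
    · have hmin : min a x = a := by omega
      have hxa : decide (x < a) = false := by simp; omega
      simp only [hmin, hxa, Bool.false_or, decide_eq_true hax, Bool.true_and]
      ring
    · have hmin : min a x = x := by omega
      have hxa : decide (x < a) = true := by simp; omega
      have hax' : decide (a ≤ x) = false := by simp; omega
      simp only [hmin, hxa, Bool.true_or, hax', Bool.false_and, if_true, if_false,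
        all_le_eq_not_any_lt]
      by_cases hq : q.any (fun y => decide (x < y)) <;> simp [hq] <;> ring

theorem cntLow_append_low (p : List Int) (x m : Int) (h : m < x) :
    cntLow (p ++ [x]) m = 0 := by
  induction p with
  | nil =>
    simp only [List.nil_append, cntLow, List.all_nil, Bool.and_true, add_zero]
    rw [if_neg]
    simp only [decide_eq_true_iff]
    omega
  | cons a q ih =>
    simp only [List.cons_append, cntLow, ih, add_zero, List.all_append, List.all_cons,
      List.all_nil, Bool.and_true]
    rw [if_neg]
    simp only [Bool.and_eq_true, decide_eq_true_iff, List.all_eq_true, not_and, and_imp]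
    intros
    omega

theorem cntLow_append_high (p : List Int) (x m : Int) (h : x ≤ m) :
    cntLow (p ++ [x]) m = cntLow p m - cntLow p (x - 1) + 1 := by
  induction p with
  | nil =>
    simp only [List.nil_append, cntLow, List.all_nil, Bool.and_true, add_zero]
    rw [if_pos]
    · ring
    · simp only [decide_eq_true_iff]; omega
  | cons a q ih =>
    simp only [List.cons_append, cntLow, ih, List.all_append, List.all_cons, List.all_nil,
      Bool.and_true]
    by_cases hall : q.all (fun y => decide (y ≤ a)) = true
    · by_cases h1 : x ≤ a
      · have e1 : decide (x ≤ a) = true := decide_eq_true h1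
        have e2 : decide (a ≤ x - 1) = false := by simp only [decide_eq_false_iff_not]; omega
        simp only [hall, e1, e2, Bool.and_true, Bool.true_and, Bool.false_and, Bool.and_false]
        split_ifs
        all_goals try contradiction
        all_goals ring
      · have e1 : decide (x ≤ a) = false := by simp only [decide_eq_false_iff_not]; omega
        have e2 : decide (a ≤ m) = true := by simp only [decide_eq_true_iff]; omega
        have e3 : decide (a ≤ x - 1) = true := by simp only [decide_eq_true_iff]; omega
        simp only [hall, e1, e2, e3, Bool.and_true, Bool.true_and, Bool.and_false, if_false,
          if_true]
        split_ifs
        all_goals try contradiction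
        all_goals ring
    · rw [Bool.not_eq_true] at hall
      simp only [hall, Bool.and_false, Bool.false_and, if_false]
      split_ifs
      all_goals try contradiction
      all_goals ring

theorem sumLE_zero (m : Int) : ∀ (s : List (Int × Int)), (∀ e ∈ s, m < e.1) → sumLE s m = 0
  | [], _ => rfl
  | e :: t, h => by
    have h1 := h e (by simp)
    rw [sumLE, if_neg (by omega), sumLE_zero m t (fun e' he' => h e' (by simp [he']))]
    omega

theorem sumLE_append (m : Int) : ∀ (u v : List (Int × Int)),
    sumLE (u ++ v) m = sumLE u m + sumLE v m
  | [], v => by simp [sumLE]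
  | e :: u, v => by rw [List.cons_append, sumLE, sumLE, sumLE_append m u v]; ring

theorem sumLE_congr (x m : Int) (hxm : x ≤ m) : ∀ (u : List (Int × Int)),
    (∀ e ∈ u, e.1 ≤ x) → sumLE u m = sumLE u x
  | [], _ => rfl
  | e :: t, h => by
    have h1 := h e (by simp)
    rw [sumLE, sumLE, if_pos (by omega), if_pos (by omega),
      sumLE_congr x m hxm t (fun e' he' => h e' (by simp [he']))]

theorem findCnt (x : Int) : ∀ (s : List (Int × Int)), s.Pairwise (fun u v => u.1 < v.1) →
    (match s.find? (fun e => e.1 == x) with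
      | some e => e.2
      | none => 0) = sumLE s x - sumLE s (x - 1)
  | [], _ => by simp [sumLE]
  | (h, c) :: t, hpw => by
    obtain ⟨hht, hpt⟩ := List.pairwise_cons.mp hpw
    by_cases hx : h = x
    · have hfind : ((h, c) :: t).find? (fun e => e.1 == x) = some (h, c) := by
        apply List.find?_cons_of_pos; simp [hx]
      have hz1 : sumLE t x = 0 :=
        sumLE_zero x t (fun e he => by have := hht e he; simp at this; omega)
      have hz2 : sumLE t (x - 1) = 0 :=
        sumLE_zero (x - 1) t (fun e he => by have := hht e he; simp at this; omega)
      simp only [hfind, sumLE, hz1, hz2]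
      rw [if_pos (show (h, c).1 ≤ x by omega), if_neg (show ¬(h, c).1 ≤ x - 1 by simp only []; omega)]
      ring
    · have hfind : ((h, c) :: t).find? (fun e => e.1 == x) = t.find? (fun e => e.1 == x) := by
        apply List.find?_cons_of_neg; simp [hx]
      simp only [hfind, findCnt x t hpt, sumLE]
      rcases lt_or_gt_of_ne hx with hlt | hgt
      · rw [if_pos (show (h, c).1 ≤ x by omega), if_pos (show (h, c).1 ≤ x - 1 by simp only []; omega)]
        ring
      · rw [if_neg (show ¬(h, c).1 ≤ x by simp only []; omega), if_neg (show ¬(h, c).1 ≤ x - 1 by simp only []; omega)]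
        ring

theorem dropWhile_gt (x : Int) : ∀ (s : List (Int × Int)), s.Pairwise (fun u v => u.1 < v.1) →
    ∀ e ∈ s.dropWhile (fun e => decide (e.1 ≤ x)), x < e.1
  | [], _ => by simp
  | (h, c) :: t, hpw => by
    obtain ⟨hht, hpt⟩ := List.pairwise_cons.mp hpw
    by_cases hle : h ≤ x
    · rw [List.dropWhile_cons_of_pos (by simpa)]
      exact dropWhile_gt x t hpt
    · rw [List.dropWhile_cons_of_neg (by simp only [decide_eq_true_iff]; omega)]
      intro e he
      rcases List.mem_cons.mp he with rfl | he
      · show x < h; omega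
      · exact lt_trans (show x < h by omega) (hht e he)

theorem popLoop_spec (x : Int) : ∀ (s : List (Int × Int)) (ans cnt : Int),
    s.Pairwise (fun u v => u.1 < v.1) →
    popLoop x s ans cnt = (s.dropWhile (fun e => decide (e.1 ≤ x)), ans + sumLE s x,
      match s.find? (fun e => e.1 == x) with
      | some e => e.2
      | none => cnt)
  | [], ans, cnt, _ => by simp [popLoop, sumLE]
  | (h, c) :: t, ans, cnt, hpw => by
    obtain ⟨hht, hpt⟩ := List.pairwise_cons.mp hpw
    by_cases hle : h = x ∨ h < x
    · rw [popLoop, if_pos hle, popLoop_spec x t (ans + c) _ hpt]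
      have hdw : ((h, c) :: t).dropWhile (fun e => decide (e.1 ≤ x)) =
          t.dropWhile (fun e => decide (e.1 ≤ x)) := by
        apply List.dropWhile_cons_of_pos; simp; omega
      have hsum : sumLE ((h, c) :: t) x = c + sumLE t x := by
        rw [sumLE, if_pos (by simp; omega)]
      rw [hdw, hsum]
      by_cases hx : h = x
      · have hfind1 : ((h, c) :: t).find? (fun e => e.1 == x) = some (h, c) := by
          apply List.find?_cons_of_pos; simp [hx]
        have hfind2 : t.find? (fun e => e.1 == x) = none := by
          rw [List.find?_eq_none]
          intro e he
          have h2 : h < e.1 := hht e he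
          simp only [beq_iff_eq]
          omega
        rw [hfind1, hfind2]
        simp only [Prod.mk.injEq]
        refine ⟨by trivial, by ring, by rw [if_pos hx]⟩
      · have hfind1 : ((h, c) :: t).find? (fun e => e.1 == x) =
            t.find? (fun e => e.1 == x) := by
          apply List.find?_cons_of_neg; simp [hx]
        rw [hfind1]
        have hcnt : (if h = x then c else cnt) = cnt := if_neg hx
        simp only [Prod.mk.injEq, hcnt]
        refine ⟨by trivial, by ring, by trivial⟩
    · rw [popLoop, if_neg hle]
      have hgt : x < h := by omega
      have hall : ∀ e ∈ (h, c) :: t, x < e.1 := by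
        intro e he
        rcases List.mem_cons.mp he with rfl | he
        · exact hgt
        · exact lt_trans hgt (hht e he)
      have hdw : ((h, c) :: t).dropWhile (fun e => decide (e.1 ≤ x)) = (h, c) :: t := by
        apply List.dropWhile_cons_of_neg; simp only [decide_eq_true_iff]; omega
      have hfind : ((h, c) :: t).find? (fun e => e.1 == x) = none := by
        rw [List.find?_eq_none]
        intro e he
        have := hall e he
        simp; omega
      rw [hdw, hfind, sumLE_zero x _ hall]
      simp only [Prod.mk.injEq]
      refine ⟨by trivial, by ring, by trivial⟩

theorem step_main (p : List Int) (s : List (Int × Int)) (ans x : Int) (hInv : StackInv p s) :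
    (stepA (s, ans) x).2 = ans + visTo p x ∧ StackInv (p ++ [x]) (stepA (s, ans) x).1 := by
  obtain ⟨hPW, hSum, hEx⟩ := hInv
  cases s with
  | nil =>
    have hp : p = [] := by
      cases p with
      | nil => rfl
      | cons a q =>
        exfalso
        have := (hEx (a - 1)).mpr ⟨a, by simp, by omega⟩
        simp at this
    subst hp
    refine ⟨by simp [stepA, visTo], by simp [stepA], ?_, ?_⟩
    · intro m
      simp only [stepA, sumLE, cntLow, List.nil_append, List.all_nil, Bool.and_true, add_zero]
      by_cases hxm : x ≤ m
      · rw [if_pos (show ((x : Int), (1 : Int)).1 ≤ m from hxm), if_pos (by simpa)]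
      · rw [if_neg (show ¬((x : Int), (1 : Int)).1 ≤ m from hxm),
          if_neg (by simp only [decide_eq_true_iff]; exact hxm)]
    · intro m
      simp [stepA]
  | cons hc t =>
    obtain ⟨h0, c0⟩ := hc
    have hht : ∀ e ∈ t, h0 < e.1 := (List.pairwise_cons.mp hPW).1
    by_cases hbr : h0 > x
    · -- push branch
      have hall : ∀ e ∈ (h0, c0) :: t, x < e.1 := by
        intro e he
        rcases List.mem_cons.mp he with rfl | he
        · exact hbr
        · exact lt_trans hbr (hht e he)
      have hs0 : ∀ m, m ≤ x → sumLE ((h0, c0) :: t) m = 0 := fun m hm =>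
        sumLE_zero m _ (fun e he => lt_of_le_of_lt hm (hall e he))
      have hvis : visTo p x = 1 := by
        rw [visTo_split]
        have h1 : cntLow p x = 0 := by rw [← hSum x]; exact hs0 x le_rfl
        have h2 : p.any (fun y => decide (x < y)) = true := by
          rw [List.any_eq_true]
          obtain ⟨y, hy, hxy⟩ := (hEx x).mp ⟨(h0, c0), by simp, hbr⟩
          exact ⟨y, hy, decide_eq_true hxy⟩
        simp [h1, h2]
      refine ⟨by simp [stepA, if_pos hbr, hvis], ?_, ?_, ?_⟩
      · simp only [stepA, if_pos hbr]
        exact List.pairwise_cons.mpr ⟨hall, hPW⟩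
      · intro m
        simp only [stepA, if_pos hbr]
        rw [sumLE]
        by_cases hm : x ≤ m
        · rw [cntLow_append_high p x m hm, ← hSum m, ← hSum (x - 1), hs0 (x - 1) (by omega),
            if_pos (show ((x : Int), (1 : Int)).1 ≤ m from hm)]
          ring
        · rw [cntLow_append_low p x m (by omega), hs0 m (by omega),
            if_neg (show ¬((x : Int), (1 : Int)).1 ≤ m from hm)]
          norm_num
      · intro m
        simp only [stepA, if_pos hbr]
        constructor
        · rintro ⟨e, he, hlt⟩
          rcases List.mem_cons.mp he with rfl | he
          · exact ⟨x, by simp, hlt⟩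
          · obtain ⟨y, hy, hxy⟩ := (hEx m).mp ⟨e, he, hlt⟩
            exact ⟨y, by simp [hy], hxy⟩
        · rintro ⟨y, hy, hlt⟩
          rcases List.mem_append.mp hy with hy | hy
          · obtain ⟨e, he, hlt'⟩ := (hEx m).mpr ⟨y, hy, hlt⟩
            exact ⟨e, List.mem_cons_of_mem _ he, hlt'⟩
          · have hyx : y = x := by simpa using hy
            subst hyx
            exact ⟨(y, 1), List.mem_cons_self, hlt⟩
    · -- pop branch
      have hps := popLoop_spec x ((h0, c0) :: t) ans 0 hPW
      have hcnt0 := findCnt x ((h0, c0) :: t) hPW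
      have hDgt := dropWhile_gt x ((h0, c0) :: t) hPW
      have hDpw : (((h0, c0) :: t).dropWhile (fun e => decide (e.1 ≤ x))).Pairwise
          (fun u v => u.1 < v.1) := hPW.sublist (List.dropWhile_sublist _)
      have hsplit := List.takeWhile_append_dropWhile
        (p := fun e => decide (e.1 ≤ x)) (l := (h0, c0) :: t)
      have htake : ∀ e ∈ ((h0, c0) :: t).takeWhile (fun e => decide (e.1 ≤ x)), e.1 ≤ x := by
        intro e he
        simpa using List.mem_takeWhile_imp he
      have hDsum0 : sumLE (((h0, c0) :: t).dropWhile (fun e => decide (e.1 ≤ x))) x = 0 :=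
        sumLE_zero _ _ hDgt
      have hsum_m : ∀ m, sumLE ((h0, c0) :: t) m =
          sumLE (((h0, c0) :: t).takeWhile (fun e => decide (e.1 ≤ x))) m +
          sumLE (((h0, c0) :: t).dropWhile (fun e => decide (e.1 ≤ x))) m := by
        intro m
        conv_lhs => rw [← hsplit]
        exact sumLE_append m _ _
      have htcongr : ∀ m, x ≤ m →
          sumLE (((h0, c0) :: t).takeWhile (fun e => decide (e.1 ≤ x))) m =
          sumLE (((h0, c0) :: t).takeWhile (fun e => decide (e.1 ≤ x))) x := by
        intro m hm
        exact sumLE_congr x m hm _ htake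
      cases hDe : ((h0, c0) :: t).dropWhile (fun e => decide (e.1 ≤ x)) with
      | nil =>
        rw [hDe] at hps hDgt hDpw hDsum0
        have hsplit' := hsplit
        rw [hDe, List.append_nil] at hsplit'
        have hallle : ∀ e ∈ (h0, c0) :: t, e.1 ≤ x := by
          intro e he
          rw [← hsplit'] at he
          exact htake e he
        have hnoex : ∀ y ∈ p, ¬ x < y := by
          intro y hy hxy
          obtain ⟨e, he, hlt⟩ := (hEx x).mpr ⟨y, hy, hxy⟩
          have := hallle e he
          omega
        have hvis : visTo p x = cntLow p x := by
          rw [visTo_split]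
          have hany : p.any (fun y => decide (x < y)) = false := by
            rw [List.any_eq_false]
            intro y hy
            simp only [decide_eq_true_iff]
            exact hnoex y hy
          simp [hany]
        have hscongr : ∀ m, x ≤ m → sumLE ((h0, c0) :: t) m = sumLE ((h0, c0) :: t) x :=
          fun m hm => sumLE_congr x m hm _ hallle
        refine ⟨?_, ?_, ?_, ?_⟩
        · simp only [stepA, if_neg hbr, hps, hDe]
          rw [hvis, ← hSum x]
        · simp only [stepA, if_neg hbr, hps, hDe]
          simp
        · intro m
          simp only [stepA, if_neg hbr, hps, hDe]
          rw [sumLE, sumLE]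
          by_cases hm : x ≤ m
          · rw [cntLow_append_high p x m hm, ← hSum m, ← hSum (x - 1),
              if_pos (show ((x : Int), _).1 ≤ m from hm)]
            have e1 := hscongr m hm
            linarith
          · rw [cntLow_append_low p x m (by omega),
              if_neg (show ¬((x : Int), _).1 ≤ m from hm)]
            norm_num
        · intro m
          simp only [stepA, if_neg hbr, hps, hDe]
          constructor
          · rintro ⟨e, he, hlt⟩
            rcases List.mem_cons.mp he with rfl | he
            · exact ⟨x, by simp, hlt⟩
            · simp at he
          · rintro ⟨y, hy, hlt⟩
            have hmx : m < x := by
              rcases List.mem_append.mp hy with hy | hy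
              · have := hnoex y hy
                omega
              · have hyx : y = x := by simpa using hy
                omega
            exact ⟨(x, _), List.mem_cons_self, hmx⟩
      | cons d ds =>
        obtain ⟨d1, d2⟩ := d
        rw [hDe] at hps hDgt hDpw hDsum0
        have hsum_m' : ∀ m, sumLE ((h0, c0) :: t) m =
            sumLE (((h0, c0) :: t).takeWhile (fun e => decide (e.1 ≤ x))) m +
            sumLE ((d1, d2) :: ds) m := by
          intro m
          rw [hsum_m m, hDe]
        have hd1 : x < d1 := hDgt (d1, d2) List.mem_cons_self
        have hmemS : ∀ e ∈ (d1, d2) :: ds, e ∈ (h0, c0) :: t := by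
          intro e he
          exact (hDe ▸ List.dropWhile_sublist (l := (h0, c0) :: t)
            (p := fun e => decide (e.1 ≤ x))).subset he
        have hvis : visTo p x = cntLow p x + 1 := by
          rw [visTo_split]
          have hany : p.any (fun y => decide (x < y)) = true := by
            rw [List.any_eq_true]
            obtain ⟨y, hy, hxy⟩ := (hEx x).mp ⟨(d1, d2), hmemS _ List.mem_cons_self, hd1⟩
            exact ⟨y, hy, decide_eq_true hxy⟩
          simp [hany]
        refine ⟨?_, ?_, ?_, ?_⟩
        · simp only [stepA, if_neg hbr, hps, hDe]
          rw [if_pos hd1, hvis, ← hSum x]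
          ring
        · simp only [stepA, if_neg hbr, hps, hDe]
          refine List.pairwise_cons.mpr ⟨?_, hDpw⟩
          intro e he
          exact hDgt e he
        · intro m
          simp only [stepA, if_neg hbr, hps, hDe]
          rw [sumLE]
          by_cases hm : x ≤ m
          · rw [cntLow_append_high p x m hm, ← hSum m, ← hSum (x - 1),
              if_pos (show ((x : Int), _).1 ≤ m from hm)]
            have e1 := hsum_m' m
            have e2 := hsum_m' x
            have e3 := htcongr m hm
            linarith
          · rw [cntLow_append_low p x m (by omega),
              if_neg (show ¬((x : Int), _).1 ≤ m from hm)]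
            have hz : sumLE ((d1, d2) :: ds) m = 0 :=
              sumLE_zero m _ (fun e he => lt_trans (by omega) (hDgt e he))
            rw [hz]
            norm_num
        · intro m
          simp only [stepA, if_neg hbr, hps, hDe]
          constructor
          · rintro ⟨e, he, hlt⟩
            rcases List.mem_cons.mp he with rfl | he
            · exact ⟨x, by simp, hlt⟩
            · obtain ⟨y, hy, hxy⟩ := (hEx m).mp ⟨e, hmemS e he, hlt⟩
              exact ⟨y, by simp [hy], hxy⟩
          · rintro ⟨y, hy, hlt⟩
            by_cases hmx : m < x
            · exact ⟨(x, _), List.mem_cons_self, hmx⟩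
            · rcases List.mem_append.mp hy with hy | hy
              · obtain ⟨e, he, hlt'⟩ := (hEx m).mpr ⟨y, hy, hlt⟩
                have heD : e ∈ (d1, d2) :: ds := by
                  rw [← hsplit, List.mem_append, hDe] at he
                  rcases he with he | he
                  · exact absurd (htake e he) (by omega)
                  · exact he
                exact ⟨e, List.mem_cons_of_mem _ heD, hlt'⟩
              · have hyx : y = x := by simpa using hy
                omega

theorem StackInv_nil : StackInv [] [] := by
  refine ⟨List.Pairwise.nil, fun m => rfl, fun m => by simp⟩

theorem runA_eq : ∀ (r p : List Int) (s : List (Int × Int)) (ans : Int), StackInv p s →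
    (r.foldl stepA (s, ans)).2 = ans + Sspec p r
  | [], p, s, ans, _ => by simp [Sspec]
  | x :: r, p, s, ans, hI => by
    obtain ⟨h2, hI'⟩ := step_main p s ans x hI
    have hpair : stepA (s, ans) x = ((stepA (s, ans) x).1, ans + visTo p x) := by
      rw [← h2]
    rw [List.foldl_cons, hpair, runA_eq r (p ++ [x]) _ _ hI', Sspec]
    ring

theorem S_nil_eq_T (l : List Int) : Sspec [] l = Tspec l := by
  rw [Sspec_eq]
  simp [crossL]

-- ----- B's loops compute Tspec -----

theorem mxLe_mono (mx : Option Int) (m m' : Int) (h : m ≤ m') (hle : mxLeB mx m = true) :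
    mxLeB mx m' = true := by
  cases mx <;> simp_all [mxLeB] <;> omega

theorem visF_dead (a : Int) : ∀ (s : List Int) (mx : Option Int), mxLeB mx a = false →
    visF a mx s = 0
  | [], _, _ => rfl
  | b :: s, mx, h => by
    have hc : ¬ (mxLeB mx (min a b) = true) := fun hc => by
      rw [mxLe_mono mx _ a (min_le_left a b) hc] at h
      exact absurd h (by simp)
    rw [visF, if_neg hc, visF_dead a s (bumpMax mx b) (by rw [mxLe_bump]; simp [h])]
    norm_num

theorem innerB_eq (a : Int) : ∀ (s : List Int) (mx : Option Int) (ans : Int),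
    innerB a mx s ans = ans + visF a mx s
  | [], mx, ans => by simp [innerB, visF]
  | b :: s, mx, ans => by
    rw [innerB, visF]
    by_cases hbrk : mxLeB (bumpMax mx b) a
    · rw [if_pos hbrk, innerB_eq a s]
      ring
    · rw [if_neg hbrk, visF_dead a s (bumpMax mx b) (by simpa using hbrk)]
      ring

theorem outerB_eq : ∀ (l : List Int) (ans : Int), outerB l ans = ans + Tspec l
  | [], ans => by simp [outerB, Tspec]
  | a :: s, ans => by
    rw [outerB, innerB_eq, outerB_eq s, Tspec]
    ring

-- ===== VERDICT (by name: the statement is the Claim_ definition above) =====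
theorem solution_spec : Claim_equal_solution := by
  intro n nums _
  unfold Spec_solution solution solution_alt
  by_cases h : n = 1 ∨ n = 2
  · simp [h]
  · simp only [h, if_false]
    rw [runA_eq nums [] [] 0 StackInv_nil, outerB_eq, S_nil_eq_T]
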